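-- pv_equiv track=rewrite | github.com/freemankevin/registry-sync | scripts/core/cleanup.py | _is_old_format
-- ===== SOURCE A (Python) =====
-- from typing import Dict, List, Set, Tuple, Optional
--
-- def _is_old_format(pkg: str, expected_packages: Set[str]) -> bool:
--     """检查 package 是否是旧格式（包含域名前缀）
--
--     Args:
--         pkg: package 名称
--         expected_packages: 预期保留的 package 集合
--
--     Returns:
--         True 如果是旧格式，False 否则
--     """
--     # 旧的域名前缀列表
--     old_prefixes = [
--         'docker-io/', 'gcr-io/', 'quay-io/', 'registry-k8s-io/',
--         'docker-io__', 'gcr-io__', 'quay-io__', 'registry-k8s-io__'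
--     ]
--
--     # 检查是否以旧的域名前缀开头
--     for prefix in old_prefixes:
--         if pkg.startswith(prefix):
--             # 移除前缀后检查是否在预期集合中
--             new_pkg = pkg[len(prefix):]
--             if new_pkg in expected_packages or new_pkg.replace('__', '/') in expected_packages:
--                 return True
--
--     return False
-- ===== SOURCE B (Python) =====
-- def _is_old_format(pkg, expected_packages):
--     """Single left-to-right scan: split pkg at its first '/' or '__' separator
--     instead of testing 8 prefixes; then check the 4-element domain set."""
--     _DOMAINS = {'docker-io', 'gcr-io', 'quay-io', 'registry-k8s-io'}
--     n = len(pkg)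
--     i = 0
--     while i < n:
--         if pkg[i] == '/':
--             domain, rest = pkg[:i], pkg[i + 1:]
--             break
--         if pkg[i] == '_' and i + 1 < n and pkg[i + 1] == '_':
--             domain, rest = pkg[:i], pkg[i + 2:]
--             break
--         i += 1
--     else:
--         return False
--     if domain not in _DOMAINS:
--         return False
--     return rest in expected_packages or rest.replace('__', '/') in expected_packages
-- ===== Notes on version B (the rewrite author's own statement) =====
-- stated objective: alternative
-- what changed: Instead of testing the package against 8 concrete prefixes, B scans the string once for its first '/' or '__' separator, splits there, and checks the 4-element domain set.
import Mathlib
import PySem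

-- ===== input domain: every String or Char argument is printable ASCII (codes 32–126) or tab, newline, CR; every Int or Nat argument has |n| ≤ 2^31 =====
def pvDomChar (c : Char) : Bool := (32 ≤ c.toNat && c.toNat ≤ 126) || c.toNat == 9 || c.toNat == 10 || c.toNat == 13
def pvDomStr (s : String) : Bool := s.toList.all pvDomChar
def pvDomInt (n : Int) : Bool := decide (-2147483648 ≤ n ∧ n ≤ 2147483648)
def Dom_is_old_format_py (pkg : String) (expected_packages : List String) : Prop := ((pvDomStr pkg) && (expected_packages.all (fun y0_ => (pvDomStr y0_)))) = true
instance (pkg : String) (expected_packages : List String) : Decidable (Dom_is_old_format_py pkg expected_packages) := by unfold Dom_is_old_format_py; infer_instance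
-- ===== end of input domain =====

-- B replaces A's 8-prefix probing by a single scan to the first '/' or '__' separator plus a
-- 4-element domain-set check (objective: alternative decomposition, same results).

-- ===== PORT A =====
def aOldPrefixes : List String :=
  ["docker-io/", "gcr-io/", "quay-io/", "registry-k8s-io/",
   "docker-io__", "gcr-io__", "quay-io__", "registry-k8s-io__"]

-- the 'for prefix in old_prefixes' loop (returning True from inside, else falling through)
def aCheck (pkg : String) (expected_packages : List String) : List String → Bool
  | [] => false
  | pre :: ps =>
    if PySem.Str.startswith pkg pre then
      let new_pkg := PySem.Str.slice pkg (some (PySem.Str.len pre)) none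
      if expected_packages.contains new_pkg
          || expected_packages.contains (PySem.Str.replace new_pkg "__" "/") then
        true
      else aCheck pkg expected_packages ps
    else aCheck pkg expected_packages ps

def is_old_format_py (pkg : String) (expected_packages : List String) : Bool :=
  aCheck pkg expected_packages aOldPrefixes

-- ===== PORT B =====
-- Source B's left-to-right scan for the first separator: returns (domain chars, sep-is-'/' , rest chars)
def bSplit : List Char → Option (List Char × Bool × List Char)
  | [] => none
  | '/' :: r => some ([], true, r)
  | '_' :: '_' :: r => some ([], false, r)
  | c :: r => (bSplit r).map (fun dsr => (c :: dsr.1, dsr.2.1, dsr.2.2))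

def bDomains : List String := ["docker-io", "gcr-io", "quay-io", "registry-k8s-io"]

def is_old_format_py_alt (pkg : String) (expected_packages : List String) : Bool :=
  match bSplit pkg.toList with
  | none => false
  | some (d, _, r) =>
    if bDomains.contains (String.ofList d) then
      let rest := String.ofList r
      expected_packages.contains rest
        || expected_packages.contains (PySem.Str.replace rest "__" "/")
    else false

-- ===== PRECONDITION & SPEC =====
def Spec_is_old_format_py (pkg : String) (expected_packages : List String) (out : Bool) : Prop := out = is_old_format_py_alt pkg expected_packages
instance (pkg : String) (expected_packages : List String) (out : Bool) : Decidable (Spec_is_old_format_py pkg expected_packages out) := by unfold Spec_is_old_format_py; infer_instance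

-- ===== CLAIM (what is proved, stated in full; the proofs are below) =====
def Claim_equal_is_old_format_py : Prop := ∀ (pkg : String) (expected_packages : List String), Dom_is_old_format_py pkg expected_packages → Spec_is_old_format_py pkg expected_packages (is_old_format_py pkg expected_packages)

-- ===== LEMMAS AND PROOFS =====

def sepL (s : Bool) : List Char := if s then ['/'] else ['_', '_']

-- the membership test shared by both ports
def condB (exp : List String) (x : String) : Bool :=
  exp.contains x || exp.contains (PySem.Str.replace x "__" "/")

theorem str_ext {s t : String} (h : s.toList = t.toList) : s = t := by
  have := congrArg String.ofList h; simpa using this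

theorem ofList_eq_lit {d : List Char} {t : String} (h : String.ofList d = t) : d = t.toList := by
  have := congrArg String.toList h; simpa using this

-- bSplit only returns genuine decompositions
theorem bSplit_eq_append (cs d : List Char) (s : Bool) (r : List Char)
    (h : bSplit cs = some (d, s, r)) : cs = d ++ sepL s ++ r := by
  fun_induction bSplit cs generalizing d s r with
  | case1 => simp at h
  | case2 r' => simp at h; obtain ⟨h1, h2, h3⟩ := h; subst h1; subst h2; simp [← h3, sepL]
  | case3 r' => simp at h; obtain ⟨h1, h2, h3⟩ := h; subst h1; subst h2; simp [← h3, sepL]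
  | case4 c r' h1 h2 ih =>
    match hb : bSplit r' with
    | none => rw [hb] at h; simp at h
    | some (d0, s0, r0) =>
      rw [hb] at h; simp at h
      obtain ⟨hd, hs, hr⟩ := h
      have hr' := ih d0 s0 r0 hb
      rw [← hd, ← hs, ← hr, hr']; simp

theorem bSplit_docker (s : Bool) (r : List Char) :
    bSplit (['d','o','c','k','e','r','-','i','o'] ++ sepL s ++ r)
      = some (['d','o','c','k','e','r','-','i','o'], s, r) := by
  cases s <;> simp [bSplit, sepL]

theorem bSplit_gcr (s : Bool) (r : List Char) :
    bSplit (['g','c','r','-','i','o'] ++ sepL s ++ r)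
      = some (['g','c','r','-','i','o'], s, r) := by
  cases s <;> simp [bSplit, sepL]

theorem bSplit_quay (s : Bool) (r : List Char) :
    bSplit (['q','u','a','y','-','i','o'] ++ sepL s ++ r)
      = some (['q','u','a','y','-','i','o'], s, r) := by
  cases s <;> simp [bSplit, sepL]

theorem bSplit_reg (s : Bool) (r : List Char) :
    bSplit (['r','e','g','i','s','t','r','y','-','k','8','s','-','i','o'] ++ sepL s ++ r)
      = some (['r','e','g','i','s','t','r','y','-','k','8','s','-','i','o'], s, r) := by
  cases s <;> simp [bSplit, sepL]

-- A's loop is the existence of a matching prefix with the membership condition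
theorem aCheck_true_iff (pkg : String) (exp : List String) (ps : List String) :
    aCheck pkg exp ps = true ↔
      ∃ p ∈ ps, PySem.Str.startswith pkg p = true ∧
        condB exp (PySem.Str.slice pkg (some (PySem.Str.len p)) none) = true := by
  induction ps with
  | nil => simp [aCheck]
  | cons pre ps ih =>
    simp only [aCheck]
    by_cases h1 : PySem.Str.startswith pkg pre = true
    · by_cases h2 : condB exp (PySem.Str.slice pkg (some (PySem.Str.len pre)) none) = true
      · have h2' := h2
        unfold condB at h2'
        simp only [h1, if_true, h2', List.mem_cons]
        constructor
        · intro _; exact ⟨pre, Or.inl rfl, h1, h2⟩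
        · intro _; trivial
      · have h2' : (exp.contains (PySem.Str.slice pkg (some (PySem.Str.len pre)) none)
            || exp.contains (PySem.Str.replace
                 (PySem.Str.slice pkg (some (PySem.Str.len pre)) none) "__" "/")) = false := by
          rw [Bool.eq_false_iff]; intro hc; exact h2 hc
        simp only [h1, if_true, h2', Bool.false_eq_true, if_false, ih, List.mem_cons]
        constructor
        · rintro ⟨p, hp, hrest⟩; exact ⟨p, Or.inr hp, hrest⟩
        · rintro ⟨p, hp | hp, hrest⟩
          · subst hp; exact absurd hrest.2 h2
          · exact ⟨p, hp, hrest⟩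
    · rw [if_neg h1, ih]
      constructor
      · rintro ⟨p, hp, hrest⟩; exact ⟨p, List.mem_cons_of_mem _ hp, hrest⟩
      · rintro ⟨p, hp, hrest⟩
        rcases List.mem_cons.mp hp with rfl | hp'
        · exact absurd hrest.1 h1
        · exact ⟨p, hp', hrest⟩

-- a matching prefix: startswith holds and the slice is exactly the rest
theorem prefix_facts (pkg p : String) (d : List Char) (s : Bool) (r : List Char)
    (hp : p.toList = d ++ sepL s) (hd : pkg.toList = d ++ sepL s ++ r) :
    PySem.Str.startswith pkg p = true ∧
      PySem.Str.slice pkg (some (PySem.Str.len p)) none = String.ofList r := by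
  constructor
  · simp only [PySem.Str.startswith_eq, PySem.Chars.startswith_iff, hp, hd]
    exact List.prefix_append _ _
  · apply str_ext
    rw [PySem.Str.toList_slice, PySem.Chars.slice_eq_listSlice, PySem.Str.len_eq,
      PySem.List.slice_from_natCast, hd, hp, List.drop_left]
    simp

theorem alt_none (pkg : String) (exp : List String) (hb : bSplit pkg.toList = none) :
    is_old_format_py_alt pkg exp = false := by
  unfold is_old_format_py_alt; rw [hb]

theorem alt_some (pkg : String) (exp : List String) (d : List Char) (s : Bool) (r : List Char)
    (hb : bSplit pkg.toList = some (d, s, r)) :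
    is_old_format_py_alt pkg exp
      = if bDomains.contains (String.ofList d) = true then condB exp (String.ofList r)
        else false := by
  unfold is_old_format_py_alt condB; rw [hb]

theorem is_old_format_eq (pkg : String) (exp : List String) :
    is_old_format_py pkg exp = is_old_format_py_alt pkg exp := by
  rw [Bool.eq_iff_iff]
  constructor
  · intro hA
    rw [is_old_format_py, aCheck_true_iff] at hA
    obtain ⟨p, hmem, hsw, hcond⟩ := hA
    rw [PySem.Str.startswith_eq, PySem.Chars.startswith_iff] at hsw
    obtain ⟨t, ht⟩ := hsw
    simp only [aOldPrefixes, List.mem_cons, List.not_mem_nil, or_false] at hmem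
    rcases hmem with h | h | h | h | h | h | h | h <;> subst h <;>
      [ (have hd : pkg.toList = ['d','o','c','k','e','r','-','i','o'] ++ sepL true ++ t := by
           rw [← ht]; simp [sepL]
         have hb := bSplit_docker true t
         have hpf := prefix_facts pkg "docker-io/" _ true t (by decide) hd);
        (have hd : pkg.toList = ['g','c','r','-','i','o'] ++ sepL true ++ t := by
           rw [← ht]; simp [sepL]
         have hb := bSplit_gcr true t
         have hpf := prefix_facts pkg "gcr-io/" _ true t (by decide) hd);
        (have hd : pkg.toList = ['q','u','a','y','-','i','o'] ++ sepL true ++ t := by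
           rw [← ht]; simp [sepL]
         have hb := bSplit_quay true t
         have hpf := prefix_facts pkg "quay-io/" _ true t (by decide) hd);
        (have hd : pkg.toList = ['r','e','g','i','s','t','r','y','-','k','8','s','-','i','o'] ++ sepL true ++ t := by
           rw [← ht]; simp [sepL]
         have hb := bSplit_reg true t
         have hpf := prefix_facts pkg "registry-k8s-io/" _ true t (by decide) hd);
        (have hd : pkg.toList = ['d','o','c','k','e','r','-','i','o'] ++ sepL false ++ t := by
           rw [← ht]; simp [sepL]
         have hb := bSplit_docker false t
         have hpf := prefix_facts pkg "docker-io__" _ false t (by decide) hd);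
        (have hd : pkg.toList = ['g','c','r','-','i','o'] ++ sepL false ++ t := by
           rw [← ht]; simp [sepL]
         have hb := bSplit_gcr false t
         have hpf := prefix_facts pkg "gcr-io__" _ false t (by decide) hd);
        (have hd : pkg.toList = ['q','u','a','y','-','i','o'] ++ sepL false ++ t := by
           rw [← ht]; simp [sepL]
         have hb := bSplit_quay false t
         have hpf := prefix_facts pkg "quay-io__" _ false t (by decide) hd);
        (have hd : pkg.toList = ['r','e','g','i','s','t','r','y','-','k','8','s','-','i','o'] ++ sepL false ++ t := by
           rw [← ht]; simp [sepL]
         have hb := bSplit_reg false t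
         have hpf := prefix_facts pkg "registry-k8s-io__" _ false t (by decide) hd) ] <;>
    · rw [← hd] at hb
      obtain ⟨-, hslice⟩ := hpf
      rw [hslice] at hcond
      rw [alt_some pkg exp _ _ _ hb, if_pos (by decide)]
      exact hcond
  · intro hB
    match hb : bSplit pkg.toList with
    | none =>
      rw [alt_none pkg exp hb] at hB; exact absurd hB (by simp)
    | some (d, s, r) =>
      rw [alt_some pkg exp _ _ _ hb] at hB
      by_cases hdom : bDomains.contains (String.ofList d) = true
      · rw [if_pos hdom] at hB
        have hd := bSplit_eq_append _ _ _ _ hb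
        have hdm : String.ofList d ∈ bDomains := by simpa using hdom
        simp only [bDomains, List.mem_cons, List.not_mem_nil, or_false] at hdm
        have hdl : d = ['d','o','c','k','e','r','-','i','o'] ∨ d = ['g','c','r','-','i','o'] ∨
            d = ['q','u','a','y','-','i','o'] ∨
            d = ['r','e','g','i','s','t','r','y','-','k','8','s','-','i','o'] := by
          rcases hdm with h | h | h | h <;>
            [left; (right; left); (right; right; left); (right; right; right)] <;>
            exact (ofList_eq_lit h).trans (by decide)
        rw [is_old_format_py, aCheck_true_iff]
        rcases hdl with h | h | h | h <;> subst h <;> cases s <;>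
          [ (refine ⟨"docker-io__", by simp [aOldPrefixes], ?_⟩
             have hpf := prefix_facts pkg "docker-io__" _ false r (by decide) hd);
            (refine ⟨"docker-io/", by simp [aOldPrefixes], ?_⟩
             have hpf := prefix_facts pkg "docker-io/" _ true r (by decide) hd);
            (refine ⟨"gcr-io__", by simp [aOldPrefixes], ?_⟩
             have hpf := prefix_facts pkg "gcr-io__" _ false r (by decide) hd);
            (refine ⟨"gcr-io/", by simp [aOldPrefixes], ?_⟩
             have hpf := prefix_facts pkg "gcr-io/" _ true r (by decide) hd);
            (refine ⟨"quay-io__", by simp [aOldPrefixes], ?_⟩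
             have hpf := prefix_facts pkg "quay-io__" _ false r (by decide) hd);
            (refine ⟨"quay-io/", by simp [aOldPrefixes], ?_⟩
             have hpf := prefix_facts pkg "quay-io/" _ true r (by decide) hd);
            (refine ⟨"registry-k8s-io__", by simp [aOldPrefixes], ?_⟩
             have hpf := prefix_facts pkg "registry-k8s-io__" _ false r (by decide) hd);
            (refine ⟨"registry-k8s-io/", by simp [aOldPrefixes], ?_⟩
             have hpf := prefix_facts pkg "registry-k8s-io/" _ true r (by decide) hd) ] <;>
        · obtain ⟨hsw, hslice⟩ := hpf
          rw [hslice]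
          exact ⟨hsw, hB⟩
      · rw [if_neg hdom] at hB; exact absurd hB (by simp)

-- ===== VERDICT (by name: the statement is the Claim_ definition above) =====
theorem is_old_format_py_spec : Claim_equal_is_old_format_py := by
  intro pkg exp _
  unfold Spec_is_old_format_py
  exact is_old_format_eq pkg exp
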